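-- pv_equiv track=rewrite | github.com/khahnmad/Gender-in-the-Media-Coverage-of-BLM-Movement | Protests_Functions.py | search_related_words
-- ===== SOURCE A (Python) =====
-- def search_related_words(sentence_list, keyword_list):
--     token_sentences, matched_sentences, related_words_list, lowered_sentences = ([] for i in range(4))
--     # get matched sentences
--     for sentence in sentence_list:
--         for keyword in keyword_list:
--             if (keyword in sentence) and (sentence not in matched_sentences):
--                 matched_sentences.append(sentence)
--
--     # get related words in matched sentences that are not initial keywords and stopwords
--     for sentence in matched_sentences:
--         for word in sentence:
--             if (word not in keyword_list):
--                 related_words_list.append(word)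
--     return related_words_list
-- ===== SOURCE B (Python) =====
-- def search_related_words(sentence_list, keyword_list):
--     related_words_list = []
--     seen = []
--     for sentence in sentence_list:
--         if sentence in seen:
--             continue
--         if any(keyword in sentence for keyword in keyword_list):
--             seen.append(sentence)
--             for word in sentence:
--                 if word not in keyword_list:
--                     related_words_list.append(word)
--     return related_words_list
-- ===== Notes on version B (the rewrite author's own statement) =====
-- stated objective: simpler
-- what changed: Single pass over sentence_list with a 'seen' dedup list, emitting non-keyword words directly, instead of first materialising a matched_sentences list in a nested keyword loop and then re-scanning it in a second loop.
import Mathlib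
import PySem

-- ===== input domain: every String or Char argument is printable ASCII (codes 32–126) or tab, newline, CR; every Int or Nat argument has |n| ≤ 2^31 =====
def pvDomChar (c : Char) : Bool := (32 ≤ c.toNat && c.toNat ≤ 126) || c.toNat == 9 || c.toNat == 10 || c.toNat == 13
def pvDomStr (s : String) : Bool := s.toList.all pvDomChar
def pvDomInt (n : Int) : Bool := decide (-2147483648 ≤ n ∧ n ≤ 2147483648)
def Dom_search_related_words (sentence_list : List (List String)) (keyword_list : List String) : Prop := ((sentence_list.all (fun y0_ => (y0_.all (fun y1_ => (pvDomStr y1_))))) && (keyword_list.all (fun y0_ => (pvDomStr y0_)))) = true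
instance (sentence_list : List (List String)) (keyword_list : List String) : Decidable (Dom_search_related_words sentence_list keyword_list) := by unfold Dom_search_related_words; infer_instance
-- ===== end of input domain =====

-- B fuses A's two passes into one loop with a 'seen' dedup list; objective: simpler.
-- ===== PORT A =====
def search_related_words (sentence_list : List (List String)) (keyword_list : List String) : List String :=
  -- token_sentences and lowered_sentences are created but never used in A
  let matched_sentences : List (List String) :=
    sentence_list.foldl (fun ms sentence =>
      keyword_list.foldl (fun ms keyword =>
        if keyword ∈ sentence ∧ sentence ∉ ms then ms ++ [sentence] else ms) ms) []
  matched_sentences.foldl (fun rel sentence =>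
    sentence.foldl (fun rel word =>
      if word ∉ keyword_list then rel ++ [word] else rel) rel) []

-- ===== PORT B =====
def search_related_words_alt (sentence_list : List (List String)) (keyword_list : List String) : List String :=
  (sentence_list.foldl (fun (st : List String × List (List String)) sentence =>
      if sentence ∈ st.2 then st
      else if keyword_list.any (fun keyword => decide (keyword ∈ sentence)) then
        (st.1 ++ sentence.filter (fun word => decide (word ∉ keyword_list)), st.2 ++ [sentence])
      else st) ([], [])).1

-- ===== PRECONDITION & SPEC =====

def Spec_search_related_words (sentence_list : List (List String)) (keyword_list : List String) (out : List String) : Prop := out = search_related_words_alt sentence_list keyword_list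
instance (sentence_list : List (List String)) (keyword_list : List String) (out : List String) : Decidable (Spec_search_related_words sentence_list keyword_list out) := by unfold Spec_search_related_words; infer_instance

-- ===== CLAIM (what is proved, stated in full; the proofs are below) =====
def Claim_equal_search_related_words : Prop := ∀ (sentence_list : List (List String)) (keyword_list : List String), Dom_search_related_words sentence_list keyword_list → Spec_search_related_words sentence_list keyword_list (search_related_words sentence_list keyword_list)

-- ===== LEMMAS AND PROOFS =====

-- abbreviation for A's first (matched-sentences) loop starting from accumulator ms
def pvA2 (kl : List String) (sl : List (List String)) (ms : List (List String)) : List (List String) :=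
  sl.foldl (fun ms s => if (∃ k ∈ kl, k ∈ s) ∧ s ∉ ms then ms ++ [s] else ms) ms

-- non-keyword words of a list of sentences
def pvRW (kl : List String) (l : List (List String)) : List String :=
  l.flatMap (fun s => s.filter (fun w => decide (w ∉ kl)))

-- words emitted by B's loop over sl given already-seen sentences
def pvD (kl : List String) (sl : List (List String)) (seen : List (List String)) : List String :=
  match sl with
  | [] => []
  | s :: rest =>
    if s ∈ seen then pvD kl rest seen
    else if ∃ k ∈ kl, k ∈ s then
      s.filter (fun w => decide (w ∉ kl)) ++ pvD kl rest (seen ++ [s])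
    else pvD kl rest seen

-- A's inner keyword loop appends s once iff some keyword is in s and s is new
theorem pvInnerA (kl s : List String) (ms : List (List String)) :
    kl.foldl (fun ms keyword => if keyword ∈ s ∧ s ∉ ms then ms ++ [s] else ms) ms
      = if (∃ k ∈ kl, k ∈ s) ∧ s ∉ ms then ms ++ [s] else ms := by
  induction kl generalizing ms with
  | nil => simp
  | cons k kl ih =>
    rw [List.foldl_cons, ih]
    by_cases hs : s ∈ ms
    · simp [hs]
    · by_cases hk : k ∈ s
      · simp [hk, hs]
      · by_cases he : ∃ k' ∈ kl, k' ∈ s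
        · simp [hk, hs, he]
        · simp [hk, hs, he]

theorem pvOuterA (kl : List String) (sl : List (List String)) (ms : List (List String)) :
    sl.foldl (fun ms sentence =>
        kl.foldl (fun ms keyword => if keyword ∈ sentence ∧ sentence ∉ ms then ms ++ [sentence] else ms) ms) ms
      = pvA2 kl sl ms := by
  induction sl generalizing ms with
  | nil => rfl
  | cons s rest ih => rw [List.foldl_cons, pvInnerA, ih]; rfl

theorem pvWordsFold (kl : List String) (s : List String) (acc : List String) :
    s.foldl (fun rel word => if word ∉ kl then rel ++ [word] else rel) acc
      = acc ++ s.filter (fun w => decide (w ∉ kl)) := by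
  induction s generalizing acc with
  | nil => simp
  | cons w s ih =>
    rw [List.foldl_cons, ih]
    by_cases hw : w ∈ kl
    · simp [hw]
    · simp [hw]

theorem pvRelFold (kl : List String) (ms : List (List String)) (acc : List String) :
    ms.foldl (fun rel sentence =>
        sentence.foldl (fun rel word => if word ∉ kl then rel ++ [word] else rel) rel) acc
      = acc ++ pvRW kl ms := by
  induction ms generalizing acc with
  | nil => simp [pvRW]
  | cons s rest ih =>
    rw [List.foldl_cons, pvWordsFold, ih]
    simp [pvRW]

-- A's second pass over the matched list equals B's incremental emission
theorem pvKey (kl : List String) (sl : List (List String)) (seen : List (List String)) :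
    pvRW kl (pvA2 kl sl seen) = pvRW kl seen ++ pvD kl sl seen := by
  induction sl generalizing seen with
  | nil => simp [pvA2, pvD]
  | cons s rest ih =>
    by_cases hs : s ∈ seen
    · have h1 : pvA2 kl (s :: rest) seen = pvA2 kl rest seen := by simp [pvA2, hs]
      have h2 : pvD kl (s :: rest) seen = pvD kl rest seen := by simp [pvD, hs]
      rw [h1, h2, ih]
    · by_cases hk : ∃ k ∈ kl, k ∈ s
      · have h1 : pvA2 kl (s :: rest) seen = pvA2 kl rest (seen ++ [s]) := by
          simp [pvA2, hs, hk]
        have h2 : pvD kl (s :: rest) seen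
            = s.filter (fun w => decide (w ∉ kl)) ++ pvD kl rest (seen ++ [s]) := by
          simp [pvD, hs, hk]
        have h3 : pvRW kl (seen ++ [s]) = pvRW kl seen ++ s.filter (fun w => decide (w ∉ kl)) := by
          simp [pvRW]
        rw [h1, h2, ih, h3, List.append_assoc]
      · have h1 : pvA2 kl (s :: rest) seen = pvA2 kl rest seen := by simp [pvA2, hs, hk]
        have h2 : pvD kl (s :: rest) seen = pvD kl rest seen := by simp [pvD, hs, hk]
        rw [h1, h2, ih]

-- characterisation of B's single fold
theorem pvBFold (kl : List String) (sl : List (List String)) (seen : List (List String)) (out : List String) :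
    sl.foldl (fun (st : List String × List (List String)) sentence =>
        if sentence ∈ st.2 then st
        else if kl.any (fun keyword => decide (keyword ∈ sentence)) then
          (st.1 ++ sentence.filter (fun word => decide (word ∉ kl)), st.2 ++ [sentence])
        else st) (out, seen)
      = (out ++ pvD kl sl seen, pvA2 kl sl seen) := by
  induction sl generalizing seen out with
  | nil => simp [pvD, pvA2]
  | cons s rest ih =>
    rw [List.foldl_cons]
    by_cases hs : s ∈ seen
    · have hstep : (if s ∈ (out, seen).2 then (out, seen)
          else if kl.any (fun keyword => decide (keyword ∈ s)) then
            ((out, seen).1 ++ s.filter (fun word => decide (word ∉ kl)), (out, seen).2 ++ [s])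
          else (out, seen)) = (out, seen) := by simp [hs]
      have h1 : pvA2 kl (s :: rest) seen = pvA2 kl rest seen := by simp [pvA2, hs]
      have h2 : pvD kl (s :: rest) seen = pvD kl rest seen := by simp [pvD, hs]
      rw [hstep, ih, h1, h2]
    · by_cases hk : ∃ k ∈ kl, k ∈ s
      · have hb : kl.any (fun keyword => decide (keyword ∈ s)) = true := by simpa using hk
        have hstep : (if s ∈ (out, seen).2 then (out, seen)
            else if kl.any (fun keyword => decide (keyword ∈ s)) then
              ((out, seen).1 ++ s.filter (fun word => decide (word ∉ kl)), (out, seen).2 ++ [s])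
            else (out, seen))
            = (out ++ s.filter (fun word => decide (word ∉ kl)), seen ++ [s]) := by
          simp [hs, hb]
        have h1 : pvA2 kl (s :: rest) seen = pvA2 kl rest (seen ++ [s]) := by
          simp [pvA2, hs, hk]
        have h2 : pvD kl (s :: rest) seen
            = s.filter (fun w => decide (w ∉ kl)) ++ pvD kl rest (seen ++ [s]) := by
          simp [pvD, hs, hk]
        rw [hstep, ih, h1, h2, List.append_assoc]
      · have hb : ¬ kl.any (fun keyword => decide (keyword ∈ s)) = true := by simpa using hk
        have hstep : (if s ∈ (out, seen).2 then (out, seen)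
            else if kl.any (fun keyword => decide (keyword ∈ s)) then
              ((out, seen).1 ++ s.filter (fun word => decide (word ∉ kl)), (out, seen).2 ++ [s])
            else (out, seen)) = (out, seen) := by simp [hs, hb]
        have h1 : pvA2 kl (s :: rest) seen = pvA2 kl rest seen := by simp [pvA2, hs, hk]
        have h2 : pvD kl (s :: rest) seen = pvD kl rest seen := by simp [pvD, hs, hk]
        rw [hstep, ih, h1, h2]

-- ===== VERDICT (by name: the statement is the Claim_ definition above) =====
theorem search_related_words_spec : Claim_equal_search_related_words := by
  intro sl kl _
  unfold Spec_search_related_words search_related_words search_related_words_alt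
  rw [pvOuterA, pvRelFold, pvBFold, pvKey]
  simp [pvRW]
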